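-- pv_equiv track=rewrite | github.com/jesseazizi/URL-splitter | URL-splitter.py | URL_splitter
-- ===== SOURCE A (Python) =====
-- def URL_splitter(handles,delimiter,URL,per_URL,URL_separator):
--
--     # Keeps track of which URL to add handles to
--     current_URL_index=-1
--
--     # Contains all of the URLs that will be created
--     URLs=[]
--
--     # Compiling all of the handles into a list
--     new_handles=handles.split(delimiter)
--
--     # Writing all of the URLs into the URLs list:
--     # For every element in new_handles...
--     for i in range(len(new_handles)):
--
--         # Append the URL separator to the end of the element
--         new_handles[i]+=str(URL_separator)
--
--         # If we've reached the maximum number of handles per URL...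
--         if (i%per_URL)==0:
--
--            # Increment current_URL_index by 1
--            current_URL_index=current_URL_index+1
--
--            # Append a new element to URLs containing just the beginning of the URL
--            URLs+=[URL]
--
--            # Append a forward slash to the new element in URLs
--            URLs[current_URL_index]+="/"
--
--         # Append a handle (including the comma) to the current URL
--         URLs[current_URL_index]+=new_handles[i]
--
--     # Remove the extra separator at the end of each URL
--     for i in range(len(URLs)):
--         URLs[i]=URLs[i][0:len(URLs[i])-1]
--
--     # Return the new list of URLs
--     return URLs
-- ===== SOURCE B (Python) =====
-- def URL_splitter(handles, delimiter, URL, per_URL, URL_separator):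
--     new_handles = handles.split(delimiter)
--     URLs = []
--     for j in range(0, len(new_handles), per_URL):
--         joined = "".join(h + str(URL_separator) for h in new_handles[j:j + per_URL])
--         URLs.append((URL + "/" + joined)[:-1])
--     return URLs
-- ===== Notes on version B (the rewrite author's own statement) =====
-- stated objective: simpler
-- what changed: B replaces A's stateful index-tracking loop (current_URL_index, in-place mutation of new_handles and URLs, plus a second trimming pass) by a direct chunking: slice the split list into per_URL-sized chunks, build each URL string in one expression, no mutation and no second pass.
-- outside the precondition, e.g. on URL_splitter('a,b,c', ',', 'u', -2, '+'): A returns ['u/a+b', 'u/c'], B returns []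
import Mathlib
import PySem

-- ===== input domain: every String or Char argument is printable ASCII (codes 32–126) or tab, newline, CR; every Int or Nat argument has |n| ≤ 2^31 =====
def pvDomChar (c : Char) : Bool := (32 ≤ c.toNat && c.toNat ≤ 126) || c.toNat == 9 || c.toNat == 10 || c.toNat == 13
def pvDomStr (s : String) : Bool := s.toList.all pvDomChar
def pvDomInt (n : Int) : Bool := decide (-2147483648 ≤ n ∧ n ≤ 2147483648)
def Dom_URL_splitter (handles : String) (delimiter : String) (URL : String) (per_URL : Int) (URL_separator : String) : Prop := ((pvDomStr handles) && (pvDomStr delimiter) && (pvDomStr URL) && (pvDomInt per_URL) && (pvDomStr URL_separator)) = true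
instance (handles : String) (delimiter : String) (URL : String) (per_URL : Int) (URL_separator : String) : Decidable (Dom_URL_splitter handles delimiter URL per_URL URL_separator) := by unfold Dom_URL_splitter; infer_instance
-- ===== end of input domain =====

-- B replaces A's stateful index-tracking loop (current_URL_index, in-place mutation) by direct
-- per_URL-sized chunk slices, building each URL in one expression (objective: simpler).

-- ===== PORT A =====
-- A-side helper: Python 'URLs[i] += s' (get then set; the index is always in range on admitted inputs)
def pvAppendAt (l : List String) (i : Int) (s : String) : List String :=
  PySem.List.pySetD l i (PySem.List.pyGetD l i "" ++ s)

-- A's loop body: mutate new_handles[i], maybe open a new URL, append the handle to the current URL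
def pvAStep (per_URL : Int) (URL : String) (URL_separator : String)
    (st : Int × List String × List String) (i : Int) : Int × List String × List String :=
  let nh := PySem.List.pySetD st.2.2 i (PySem.List.pyGetD st.2.2 i "" ++ URL_separator)
  let idxUrls :=
    if PySem.Int.mod i per_URL = 0 then
      (st.1 + 1, pvAppendAt (st.2.1 ++ [URL]) (st.1 + 1) "/")
    else (st.1, st.2.1)
  (idxUrls.1, pvAppendAt idxUrls.2 idxUrls.1 (PySem.List.pyGetD nh i ""), nh)

def URL_splitter (handles : String) (delimiter : String) (URL : String) (per_URL : Int) (URL_separator : String) : List String :=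
  -- handles.split(delimiter): none ↔ delimiter = "" (ValueError), excluded by Pre_
  let new_handles := (PySem.Str.split? handles delimiter).getD []
  let st := (PySem.List.pyRange 0 (new_handles.length : Int) 1).foldl
      (pvAStep per_URL URL URL_separator) (-1, [], new_handles)
  -- second pass: URLs[i] = URLs[i][0:len(URLs[i])-1], elementwise
  st.2.1.map (fun u => PySem.Str.slice u (some 0) (some (PySem.Str.len u - 1)))

-- ===== PORT B =====
def URL_splitter_alt (handles : String) (delimiter : String) (URL : String) (per_URL : Int) (URL_separator : String) : List String :=
  let new_handles := (PySem.Str.split? handles delimiter).getD []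
  (PySem.List.pyRange 0 (new_handles.length : Int) per_URL).map (fun j =>
    let joined := PySem.Str.join ""
      ((PySem.List.slice new_handles (some j) (some (j + per_URL))).map (fun h => h ++ URL_separator))
    PySem.Str.slice (URL ++ "/" ++ joined) none (some (-1)))

-- ===== PRECONDITION & SPEC =====
-- Pre_ excludes delimiter = "" (A raises ValueError) and per_URL = 0 (A raises ZeroDivisionError);
-- it also excludes per_URL < 0, where A still returns (grouping by |per_URL|): a negative group size
-- is outside the task's natural domain and A's behaviour there is an accident of 'i % per_URL == 0'.
def Pre_URL_splitter (handles : String) (delimiter : String) (URL : String) (per_URL : Int) (URL_separator : String) : Prop :=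
  delimiter ≠ "" ∧ 1 ≤ per_URL
instance (handles : String) (delimiter : String) (URL : String) (per_URL : Int) (URL_separator : String) : Decidable (Pre_URL_splitter handles delimiter URL per_URL URL_separator) := by unfold Pre_URL_splitter; infer_instance

def pvWitness_URL_splitter : String × String × String × Int × String := ("a,b", ",", "u", 2, "+")

def Spec_URL_splitter (handles : String) (delimiter : String) (URL : String) (per_URL : Int) (URL_separator : String) (out : List String) : Prop := out = URL_splitter_alt handles delimiter URL per_URL URL_separator
instance (handles : String) (delimiter : String) (URL : String) (per_URL : Int) (URL_separator : String) (out : List String) : Decidable (Spec_URL_splitter handles delimiter URL per_URL URL_separator out) := by unfold Spec_URL_splitter; infer_instance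

-- ===== CLAIM (what is proved, stated in full; the proofs are below) =====
def Claim_equal_URL_splitter : Prop := ∀ (handles : String) (delimiter : String) (URL : String) (per_URL : Int) (URL_separator : String), Dom_URL_splitter handles delimiter URL per_URL URL_separator → Pre_URL_splitter handles delimiter URL per_URL URL_separator → Spec_URL_splitter handles delimiter URL per_URL URL_separator (URL_splitter handles delimiter URL per_URL URL_separator)

-- ===== LEMMAS AND PROOFS =====

-- proof-only: the split list cut into chunks of size p' (p' ≥ 1 on admitted inputs)
def pvChunks (p' : Nat) : List String → List (List String)
  | [] => []
  | h :: t => (h :: t.take (p' - 1)) :: pvChunks p' (t.drop (p' - 1))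
termination_by l => l.length
decreasing_by simp only [List.length_drop, List.length_cons]; omega

-- proof-only: A's loop re-expressed as a fold over the handle list itself (i = absolute index)
def pvLStep (per_URL : Int) (URL : String) (sep : String)
    (st : Int × Int × List String) (h : String) : Int × Int × List String :=
  let idxUrls :=
    if PySem.Int.mod st.1 per_URL = 0 then
      (st.2.1 + 1, pvAppendAt (st.2.2 ++ [URL]) (st.2.1 + 1) "/")
    else (st.2.1, st.2.2)
  (st.1 + 1, idxUrls.1, pvAppendAt idxUrls.2 idxUrls.1 (h ++ sep))

theorem pvJoinE_nil : PySem.Str.join "" [] = "" := rfl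

theorem pvJoinE_cons (a : String) (l : List String) :
    PySem.Str.join "" (a :: l) = a ++ PySem.Str.join "" l := by
  rw [← String.toList_inj]
  simp only [PySem.Str.toList_join, PySem.Chars.join, List.map_cons, String.toList_append]
  cases l <;> simp [List.intercalate]

theorem pvAppendAt_snoc (xs : List String) (u s : String) :
    pvAppendAt (xs ++ [u]) (xs.length : Int) s = xs ++ [u ++ s] := by
  simp [pvAppendAt, PySem.List.pySetD_natCast, PySem.List.pyGetD_natCast]

theorem pvTrim_eq (u : String) :
    PySem.Str.slice u (some 0) (some (PySem.Str.len u - 1)) = PySem.Str.slice u none (some (-1)) := by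
  rw [← String.toList_inj]
  simp only [PySem.Str.toList_slice, PySem.Chars.slice_eq_listSlice, PySem.List.slice_zero_start,
    PySem.Str.len_eq]
  rcases Nat.eq_zero_or_pos u.toList.length with h | h
  · simp [h]
  · have h1 : (u.toList.length : Int) - 1 = ((u.toList.length - 1 : Nat) : Int) := by omega
    rw [h1, PySem.List.slice_to_natCast, PySem.List.slice_to_neg_one, List.dropLast_eq_take]

-- A's index fold equals the list fold pvLStep
theorem pvFoldA_eq (p : Int) (URL sep : String) :
    ∀ (rest preS : List String) (idx : Int) (urls : List String),
    ((PySem.List.pyRange (preS.length : Int) ((preS.length : Int) + (rest.length : Int)) 1).foldl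
        (pvAStep p URL sep) (idx, urls, preS ++ rest)).2.1
    = (rest.foldl (pvLStep p URL sep) ((preS.length : Int), idx, urls)).2.2 := by
  intro rest
  induction rest with
  | nil =>
      intro preS idx urls
      rw [PySem.List.pyRange_one_eq_nil (by simp)]
      rfl
  | cons h t ih =>
      intro preS idx urls
      rw [PySem.List.pyRange_one_cons (by push_cast [List.length_cons]; omega), List.foldl_cons, List.foldl_cons]
      have hget : PySem.List.pyGetD (preS ++ h :: t) (preS.length : Int) "" = h := by
        simp [PySem.List.pyGetD_natCast, List.getD]
      have hset : PySem.List.pySetD (preS ++ h :: t) (preS.length : Int) (h ++ sep)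
          = (preS ++ [h ++ sep]) ++ t := by
        simp [PySem.List.pySetD_natCast]
      have hget2 : PySem.List.pyGetD ((preS ++ [h ++ sep]) ++ t) (preS.length : Int) "" = h ++ sep := by
        rw [List.append_assoc]
        simp [PySem.List.pyGetD_natCast, List.getD]
      simp only [pvAStep, pvLStep, hget, hset, hget2]
      have e1 : (preS.length : Int) + 1 = (((preS ++ [h ++ sep]).length : Int)) := by
        push_cast; simp
      have e2 : (preS.length : Int) + ((h :: t).length : Int)
          = ((preS ++ [h ++ sep]).length : Int) + (t.length : Int) := by
        push_cast; simp; omega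
      rw [e2, e1, ih]

theorem pvFoldL_inner (p : Int) (URL sep : String) :
    ∀ (ts : List String) (i0 : Int) (urls : List String) (u : String),
    (∀ k : Nat, k < ts.length → PySem.Int.mod (i0 + (k : Int)) p ≠ 0) →
    ts.foldl (pvLStep p URL sep) (i0, (urls.length : Int), urls ++ [u])
    = (i0 + (ts.length : Int), (urls.length : Int),
       urls ++ [u ++ PySem.Str.join "" (ts.map (· ++ sep))]) := by
  intro ts
  induction ts with
  | nil =>
      intro i0 urls u _
      simp [pvJoinE_nil]
  | cons a ts ih =>
      intro i0 urls u hno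
      rw [List.foldl_cons]
      have h0 : PySem.Int.mod i0 p ≠ 0 := by
        have h := hno 0 (by simp)
        simpa using h
      simp only [pvLStep, if_neg h0]
      rw [pvAppendAt_snoc]
      rw [ih (i0 + 1) urls (u ++ (a ++ sep)) ?_]
      · simp only [pvJoinE_cons, List.map_cons, List.length_cons, Prod.mk.injEq]
        refine ⟨by push_cast; ring, trivial, ?_⟩
        simp [String.append_assoc]
      · intro k hk
        have h := hno (k + 1) (by simp; omega)
        have e : i0 + ((k + 1 : Nat) : Int) = i0 + 1 + (k : Int) := by push_cast; ring
        rwa [e] at h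

theorem pvFoldL_chunks (p : Int) (hp : 1 ≤ p) (URL sep : String) :
    ∀ (hs : List String) (urls : List String),
    (hs.foldl (pvLStep p URL sep) ((urls.length : Int) * p, (urls.length : Int) - 1, urls)).2.2
    = urls ++ (pvChunks p.toNat hs).map (fun c => URL ++ "/" ++ PySem.Str.join "" (c.map (· ++ sep))) := by
  have hp' : (p.toNat : Int) = p := Int.toNat_of_nonneg (by omega)
  have hmod : ∀ (q j : Int), 0 < j → j < p → PySem.Int.mod (q * p + j) p ≠ 0 := by
    intro q j hj1 hj2 h0
    rw [PySem.Int.mod_eq_zero_iff_dvd] at h0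
    rcases h0 with ⟨c, hc⟩
    have hdj : p ∣ j := ⟨c - q, by rw [Int.mul_sub, Int.mul_comm p q]; omega⟩
    have := Int.le_of_dvd hj1 hdj
    omega
  suffices H : ∀ (n : Nat) (hs : List String), hs.length ≤ n → ∀ (urls : List String),
      (hs.foldl (pvLStep p URL sep) ((urls.length : Int) * p, (urls.length : Int) - 1, urls)).2.2
      = urls ++ (pvChunks p.toNat hs).map (fun c => URL ++ "/" ++ PySem.Str.join "" (c.map (· ++ sep))) by
    intro hs urls; exact H hs.length hs le_rfl urls
  intro n
  induction n with
  | zero =>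
      intro hs hl urls
      have hnil : hs = [] := List.length_eq_zero_iff.mp (by omega)
      subst hnil
      simp [pvChunks]
  | succ n ihn =>
      intro hs hl urls
      match hs with
      | [] => simp [pvChunks]
      | h :: t =>
        rw [List.foldl_cons]
        have hdvd : PySem.Int.mod ((urls.length : Int) * p) p = 0 := by
          rw [PySem.Int.mod_eq_zero_iff_dvd]; exact ⟨(urls.length : Int), Int.mul_comm _ _⟩
        simp only [pvLStep, if_pos hdvd]
        have e0 : (urls.length : Int) - 1 + 1 = (urls.length : Int) := by ring
        rw [e0, pvAppendAt_snoc, pvAppendAt_snoc]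
        have hfold : ∀ (s : Int × Int × List String),
            t.foldl (pvLStep p URL sep) s
            = (t.drop (p.toNat - 1)).foldl (pvLStep p URL sep)
                ((t.take (p.toNat - 1)).foldl (pvLStep p URL sep) s) := by
          intro s
          conv_lhs => rw [← List.take_append_drop (p.toNat - 1) t]
          rw [List.foldl_append]
        rw [hfold]
        rw [pvFoldL_inner p URL sep (t.take (p.toNat - 1)) ((urls.length : Int) * p + 1) urls
            ((URL ++ "/") ++ (h ++ sep)) ?_]
        · by_cases hle : t.length ≤ p.toNat - 1
          · have hdropnil : t.drop (p.toNat - 1) = [] := by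
              rw [List.drop_eq_nil_iff]; omega
            rw [hdropnil]
            simp [pvChunks, hdropnil, pvJoinE_cons, String.append_assoc]
          · have hlen : ((t.take (p.toNat - 1)).length : Int) = (p.toNat : Int) - 1 := by
              simp; omega
            have e3 : (urls.length : Int) * p + 1 + ((t.take (p.toNat - 1)).length : Int)
                = (((urls ++ [URL ++ "/" ++ (h ++ sep) ++ PySem.Str.join "" ((t.take (p.toNat - 1)).map (· ++ sep))]).length : Int)) * p := by
              rw [hlen, hp']
              simp only [List.length_append, List.length_cons, List.length_nil]
              push_cast; ring
            have e4 : (urls.length : Int) = ((urls ++ [URL ++ "/" ++ (h ++ sep) ++ PySem.Str.join "" ((t.take (p.toNat - 1)).map (· ++ sep))]).length : Int) - 1 := by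
              simp only [List.length_append, List.length_cons, List.length_nil]
              push_cast; ring
            rw [show ((URL ++ "/") ++ (h ++ sep)) ++ PySem.Str.join "" ((t.take (p.toNat - 1)).map (· ++ sep)) = URL ++ "/" ++ (h ++ sep) ++ PySem.Str.join "" ((t.take (p.toNat - 1)).map (· ++ sep)) from by simp [String.append_assoc]]
            rw [e3, e4, ihn (t.drop (p.toNat - 1)) (by simp only [List.length_drop, List.length_cons] at hl ⊢; omega)]
            simp [pvChunks, pvJoinE_cons, String.append_assoc]
        · intro k hk
          have e5 : (urls.length : Int) * p + 1 + (k : Int)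
              = (urls.length : Int) * p + (1 + (k : Int)) := by ring
          rw [e5]
          apply hmod
          · omega
          · have hkl : (k : Int) < (p.toNat : Int) - 1 := by
              have := hk
              simp at this
              omega
            omega

theorem pvBmap (p : Int) (hp : 1 ≤ p) (f : List String → String) :
    ∀ (hs : List String),
    (PySem.List.pyRange 0 (hs.length : Int) p).map
        (fun j => f (PySem.List.slice hs (some j) (some (j + p))))
    = (pvChunks p.toNat hs).map f := by
  have hp0 : (0:Int) < p := by omega
  have hp' : (p.toNat : Int) = p := Int.toNat_of_nonneg (by omega)
  suffices H : ∀ (n : Nat) (hs : List String), hs.length ≤ n →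
      (PySem.List.pyRange 0 (hs.length : Int) p).map
          (fun j => f (PySem.List.slice hs (some j) (some (j + p))))
      = (pvChunks p.toNat hs).map f by
    intro hs; exact H hs.length hs le_rfl
  intro n
  induction n with
  | zero =>
      intro hs hl
      have hnil : hs = [] := List.length_eq_zero_iff.mp (by omega)
      subst hnil
      rw [PySem.List.pyRange_of_pos _ _ hp0]
      simp [pvChunks]
  | succ n ihn =>
      intro hs hl
      match hs with
      | [] =>
          rw [PySem.List.pyRange_of_pos _ _ hp0]
          simp [pvChunks]
      | h :: t =>
          rw [PySem.List.pyRange_of_pos _ _ hp0]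
          have hpos : (0:Int) < ((h :: t).length : Int) := by
            push_cast [List.length_cons]; omega
          rw [if_pos hpos]
          have hM : (((((h :: t).length : Int)) - 0 + p - 1)/p).toNat
              = ((t.length : Int)/p).toNat + 1 := by
            have h1 : (((h :: t).length : Int) - 0 + p - 1) = (t.length : Int) + 1*p := by
              push_cast [List.length_cons]; ring
            rw [h1, Int.add_mul_ediv_right _ _ (by omega : p ≠ 0)]
            have h2 : 0 ≤ (t.length : Int)/p := Int.ediv_nonneg (by positivity) (by omega)
            omega
          rw [hM, List.range_succ_eq_map, List.map_cons, List.map_cons]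
          have hchunks : (pvChunks p.toNat (h :: t)).map f
              = f (h :: t.take (p.toNat - 1)) :: (pvChunks p.toNat (t.drop (p.toNat - 1))).map f := by
            rw [pvChunks]
            simp
          rw [hchunks]
          congr 1
          · -- head chunk
            simp only [Nat.cast_zero, mul_zero, add_zero, zero_add]
            rw [PySem.List.slice_zero_start, PySem.List.slice_to _ (le_of_lt hp0)]
            congr 1
            have hq : p.toNat = (p.toNat - 1) + 1 := by omega
            rw [hq]
            simp [List.take_succ_cons]
          · -- tail chunks
            rw [List.map_map, ← ihn (t.drop (p.toNat - 1))
                (by simp only [List.length_drop, List.length_cons] at hl ⊢; omega)]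
            rw [PySem.List.pyRange_of_pos _ _ hp0]
            by_cases hle : t.length ≤ p.toNat - 1
            · have hd0 : (t.drop (p.toNat - 1)).length = 0 := by
                simp only [List.length_drop]; omega
              have hz : ((t.length : Int)/p).toNat = 0 := by
                have := Int.ediv_eq_zero_of_lt (by positivity : (0:Int) ≤ (t.length : Int))
                  (by omega : (t.length : Int) < p)
                omega
              rw [hd0, hz, if_neg (by norm_num)]
              simp
            · have hd : ((t.drop (p.toNat - 1)).length : Int) = (t.length : Int) - p + 1 := by
                simp only [List.length_drop]
                push_cast [Nat.cast_sub (by omega : p.toNat - 1 ≤ t.length)]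
                omega
              rw [if_pos (by rw [hd]; omega)]
              have hM2 : ((((t.drop (p.toNat - 1)).length : Int) - 0 + p - 1)/p).toNat
                  = ((t.length : Int)/p).toNat := by
                rw [hd]
                congr 2
                ring
              rw [hM2, List.map_map, List.map_map]
              apply List.map_congr_left
              intro k _
              simp only [Function.comp]
              congr 1
              have ha : (0 : Int) + p * ((k+1 : Nat) : Int)
                  = ((p.toNat * (k+1) : Nat) : Int) := by push_cast [hp']; ring
              have hb : (0 : Int) + p * ((k+1 : Nat) : Int) + p
                  = ((p.toNat * (k+1) + p.toNat : Nat) : Int) := by push_cast [hp']; ring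
              have ha2 : (0 : Int) + p * ((k : Nat) : Int) = ((p.toNat * k : Nat) : Int) := by
                push_cast [hp']; ring
              have hb2 : (0 : Int) + p * ((k : Nat) : Int) + p
                  = ((p.toNat * k + p.toNat : Nat) : Int) := by push_cast [hp']; ring
              rw [show Nat.succ k = k + 1 from rfl, hb, ha, hb2, ha2,
                PySem.List.slice_natCast, PySem.List.slice_natCast]
              have e1 : p.toNat * (k+1) + p.toNat - p.toNat * (k+1) = p.toNat := by omega
              have e2 : p.toNat * k + p.toNat - p.toNat * k = p.toNat := by omega
              rw [e1, e2]
              congr 1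
              have e3 : p.toNat * (k+1) = (p.toNat - 1) + 1 + p.toNat * k := by
                have h4 : p.toNat ≠ 0 := by omega
                cases Nat.exists_eq_succ_of_ne_zero h4 with
                | intro m hm => rw [hm]; ring_nf; omega
              rw [e3, ← List.drop_drop]
              congr 1

-- ===== VERDICT (by name: the statement is the Claim_ definition above) =====
theorem URL_splitter_spec : Claim_equal_URL_splitter := by
  intro handles delimiter URL per_URL URL_separator _ hpre
  obtain ⟨hdel, hp⟩ := hpre
  unfold Spec_URL_splitter
  simp only [URL_splitter, URL_splitter_alt]
  generalize (PySem.Str.split? handles delimiter).getD [] = hs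
  have hA := pvFoldA_eq per_URL URL URL_separator hs [] (-1) []
  simp only [List.length_nil, Nat.cast_zero, List.nil_append, zero_add] at hA
  rw [hA]
  have hL := pvFoldL_chunks per_URL hp URL URL_separator hs []
  simp only [List.length_nil, Nat.cast_zero, List.nil_append, zero_mul, zero_sub] at hL
  rw [hL]
  rw [pvBmap per_URL hp
      (fun c => PySem.Str.slice (URL ++ "/" ++ PySem.Str.join "" (c.map (· ++ URL_separator)))
        none (some (-1))) hs]
  rw [List.map_map]
  apply List.map_congr_left
  intro c _
  exact pvTrim_eq _
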